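-- pv_equiv track=rewrite | github.com/Ishaan300104/speech-assignment-2 | part3_tts/synthesis.py | santhali_latin_to_phonemes
-- ===== SOURCE A (Python) =====
-- SANTHALI_G2P_MAP = {
--     # vowels
--     "a": "a", "aa": "aː", "i": "i", "ii": "iː", "u": "u", "uu": "uː",
--     "e": "e", "ee": "eː", "o": "o", "oo": "oː",
--     # nasalized vowels (tilde)
--     "an": "ã", "en": "ẽ", "on": "õ",
--     # consonants
--     "p": "p", "b": "b", "t": "t", "d": "d", "k": "k", "g": "g",
--     "c": "tʃ", "j": "dʒ", "s": "s", "sh": "ʃ", "h": "h",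
--     "m": "m", "n": "n", "ng": "ŋ",
--     "r": "r", "l": "l", "y": "j", "w": "w",
--     # glottal stop (common in Santhali)
--     "'": "ʔ",
-- }
--
-- def santhali_latin_to_phonemes(text):
--     """
--     Convert Santhali Latin transliteration to space-separated phoneme sequence.
--     Used as input to the TTS phoneme encoder.
--     """
--     text = text.lower().strip()
--     phonemes = []
--     i = 0
--     while i < len(text):
--         if text[i] == " ":
--             phonemes.append("|")  # word boundary
--             i += 1
--             continue
--         # try 2-char sequences first
--         if i + 1 < len(text) and text[i:i+2] in SANTHALI_G2P_MAP:
--             phonemes.append(SANTHALI_G2P_MAP[text[i:i+2]])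
--             i += 2
--         elif text[i] in SANTHALI_G2P_MAP:
--             phonemes.append(SANTHALI_G2P_MAP[text[i]])
--             i += 1
--         else:
--             # unknown char: pass through (numbers, punctuation)
--             phonemes.append(text[i])
--             i += 1
--     return " ".join(phonemes)
-- ===== SOURCE B (Python) =====
-- SANTHALI_G2P_MAP = {
--     "a": "a", "aa": "aː", "i": "i", "ii": "iː", "u": "u", "uu": "uː",
--     "e": "e", "ee": "eː", "o": "o", "oo": "oː",
--     "an": "ã", "en": "ẽ", "on": "õ",
--     "p": "p", "b": "b", "t": "t", "d": "d", "k": "k", "g": "g",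
--     "c": "tʃ", "j": "dʒ", "s": "s", "sh": "ʃ", "h": "h",
--     "m": "m", "n": "n", "ng": "ŋ",
--     "r": "r", "l": "l", "y": "j", "w": "w",
--     "'": "ʔ",
-- }
-- _KEYS = tuple(sorted(SANTHALI_G2P_MAP, key=len, reverse=True))
--
-- def _tokens(t):
--     toks = []
--     pos, n = 0, len(t)
--     while pos < n:
--         tok = next((k for k in _KEYS if t.startswith(k, pos)), t[pos])
--         toks.append(tok)
--         pos += len(tok)
--     return toks
--
-- def santhali_latin_to_phonemes(text):
--     t = text.lower().strip()
--     return " ".join(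
--         "|" if tok == " " else SANTHALI_G2P_MAP.get(tok, tok)
--         for tok in _tokens(t)
--     )
-- ===== Notes on version B (the rewrite author's own statement) =====
-- stated objective: alternative
-- what changed: A's hard-coded 2-char-slice-then-1-char dict-membership branch chain is replaced by a generic two-phase design: a longest-first key table (sorted once from the map) drives a tokenizer that splits the text into tokens, and a separate mapping pass turns each token into its phoneme (word boundary for a space token, otherwise the map's value with the token itself as default).
import Mathlib
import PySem

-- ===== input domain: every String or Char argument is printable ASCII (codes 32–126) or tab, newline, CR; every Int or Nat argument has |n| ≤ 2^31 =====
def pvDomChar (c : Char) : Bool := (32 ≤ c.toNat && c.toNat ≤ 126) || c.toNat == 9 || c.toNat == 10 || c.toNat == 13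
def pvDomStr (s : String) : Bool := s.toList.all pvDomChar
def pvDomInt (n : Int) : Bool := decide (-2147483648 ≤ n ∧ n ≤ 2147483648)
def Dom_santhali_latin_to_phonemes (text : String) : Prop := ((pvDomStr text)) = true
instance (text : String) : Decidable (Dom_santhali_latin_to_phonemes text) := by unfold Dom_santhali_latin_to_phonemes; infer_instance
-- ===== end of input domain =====

set_option maxRecDepth 40000

-- B replaces A's hard-coded 2-char-slice / 1-char dict-membership branch chain by a two-phase
-- design: a longest-first key table drives a tokenizer, then a separate pass maps each token
-- to its phoneme (objective: alternative; same O(n) cost).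

-- ===== PORT A =====
-- the module constant SANTHALI_G2P_MAP, in Python insertion order (shared by both Pythons)
def G2P : PySem.Dict String String := PySem.Dict.ofList [
  ("a","a"),("aa","aː"),("i","i"),("ii","iː"),("u","u"),("uu","uː"),
  ("e","e"),("ee","eː"),("o","o"),("oo","oː"),
  ("an","ã"),("en","ẽ"),("on","õ"),
  ("p","p"),("b","b"),("t","t"),("d","d"),("k","k"),("g","g"),
  ("c","tʃ"),("j","dʒ"),("s","s"),("sh","ʃ"),("h","h"),
  ("m","m"),("n","n"),("ng","ŋ"),
  ("r","r"),("l","l"),("y","j"),("w","w"),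
  ("'","ʔ")]

-- A's while loop over the index i (the string is handled as its List Char, exact on every input;
-- MAP[key] under the membership guard is getD with an arbitrary default, exact under the guard)
def loopA (cs : List Char) (i : Nat) : List String :=
  if hi : i < cs.length then
    if cs[i] = ' ' then
      "|" :: loopA cs (i+1)
    else if i + 1 < cs.length
            ∧ G2P.contains (String.ofList (PySem.List.slice cs (some (i:Int)) (some ((i:Int)+2)))) = true then
      G2P.getD (String.ofList (PySem.List.slice cs (some (i:Int)) (some ((i:Int)+2)))) "" :: loopA cs (i+2)
    else if G2P.contains (String.ofList [cs[i]]) = true then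
      G2P.getD (String.ofList [cs[i]]) "" :: loopA cs (i+1)
    else
      String.ofList [cs[i]] :: loopA cs (i+1)
  else []
termination_by cs.length - i
decreasing_by all_goals omega

def santhali_latin_to_phonemes (text : String) : String :=
  PySem.Str.join " " (loopA (PySem.Str.strip (PySem.Str.lower text)).toList 0)

-- ===== PORT B =====
-- _KEYS = tuple(sorted(SANTHALI_G2P_MAP, key=len, reverse=True))
def KEYS : List String := PySem.List.sorted G2P.keys (fun k => PySem.Str.len k) true

-- needed by tokB's termination: every key is a nonempty string
set_option maxRecDepth 8192 in
lemma KEYS_len_pos : ∀ k ∈ KEYS, 0 < k.toList.length := by decide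

-- _tokens: repeatedly take the first key of _KEYS that is a prefix of the remaining text,
-- else one raw character (pos += len(tok) is recursion on the dropped suffix)
def tokB : List Char → List String
  | [] => []
  | c :: rest =>
    match hf : KEYS.find? (fun k => k.toList.isPrefixOf (c :: rest)) with
    | some k => k :: tokB ((c :: rest).drop k.toList.length)
    | none => String.ofList [c] :: tokB rest
termination_by cs => cs.length
decreasing_by
  · have hk := KEYS_len_pos k (List.mem_of_find?_eq_some hf)
    simp only [List.length_drop, List.length_cons]
    omega
  · simp

-- the per-token mapping: "|" for a space, else SANTHALI_G2P_MAP.get(tok, tok)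
def tokPh (tok : String) : String := if tok = " " then "|" else G2P.getD tok tok

def santhali_latin_to_phonemes_alt (text : String) : String :=
  PySem.Str.join " " ((tokB (PySem.Str.strip (PySem.Str.lower text)).toList).map tokPh)

-- ===== PRECONDITION & SPEC =====
def Spec_santhali_latin_to_phonemes (text : String) (out : String) : Prop := out = santhali_latin_to_phonemes_alt text
instance (text : String) (out : String) : Decidable (Spec_santhali_latin_to_phonemes text out) := by unfold Spec_santhali_latin_to_phonemes; infer_instance

-- ===== CLAIM (what is proved, stated in full; the proofs are below) =====
def Claim_equal_santhali_latin_to_phonemes : Prop := ∀ (text : String), Dom_santhali_latin_to_phonemes text → Spec_santhali_latin_to_phonemes text (santhali_latin_to_phonemes text)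

-- ===== LEMMAS AND PROOFS =====

set_option maxRecDepth 8192 in
lemma hKEYS : KEYS = ["aa","ii","uu","ee","oo","an","en","on","sh","ng",
    "a","i","u","e","o","p","b","t","d","k","g","c","j","s","h","m","n","r","l","y","w","'"] := by
  decide

set_option maxRecDepth 8192 in
lemma keys_contains : ∀ k ∈ KEYS, G2P.contains k = true := by decide

set_option maxRecDepth 8192 in
lemma keys_len : ∀ k ∈ KEYS, k.toList.length = 1 ∨ k.toList.length = 2 := by decide

-- which two-character strings are keys of the map, as a disjunction over the pair
set_option maxRecDepth 8192 in
lemma contains_two (c1 c2 : Char) (h : G2P.contains (String.ofList [c1,c2]) = true) :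
    (c1,c2) = ('a','a') ∨ (c1,c2) = ('i','i') ∨ (c1,c2) = ('u','u') ∨ (c1,c2) = ('e','e') ∨ (c1,c2) = ('o','o') ∨
    (c1,c2) = ('a','n') ∨ (c1,c2) = ('e','n') ∨ (c1,c2) = ('o','n') ∨ (c1,c2) = ('s','h') ∨ (c1,c2) = ('n','g') := by
  rw [PySem.Dict.contains_iff_mem_keys] at h
  rw [show G2P.keys = ["a","aa","i","ii","u","uu","e","ee","o","oo","an","en","on","p","b","t","d","k","g","c","j","s","sh","h","m","n","ng","r","l","y","w","'"] from by decide] at h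
  simp only [List.mem_cons, List.not_mem_nil, or_false] at h
  rcases h with h|h|h|h|h|h|h|h|h|h|h|h|h|h|h|h|h|h|h|h|h|h|h|h|h|h|h|h|h|h|h|h <;>
    (have h2 := congrArg String.toList h; simp at h2) <;>
    (obtain ⟨rfl, rfl⟩ := h2; simp)

-- no key starts with a space
set_option maxRecDepth 8192 in
lemma find_space (rest : List Char) :
    KEYS.find? (fun k => k.toList.isPrefixOf (' ' :: rest)) = none := by
  simp [hKEYS, List.find?, List.isPrefixOf]

-- when the next two characters form a key, the table's first match is exactly that key
set_option maxRecDepth 8192 in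
lemma find_two (c1 c2 : Char) (rest : List Char) (h : G2P.contains (String.ofList [c1,c2]) = true) :
    KEYS.find? (fun k => k.toList.isPrefixOf (c1 :: c2 :: rest)) = some (String.ofList [c1,c2]) := by
  rcases contains_two c1 c2 h with h|h|h|h|h|h|h|h|h|h <;>
    (rw [Prod.mk.injEq] at h; obtain ⟨rfl, rfl⟩ := h) <;>
    simp [hKEYS, List.find?, List.isPrefixOf]

lemma tokB_space (rest : List Char) : tokB (' ' :: rest) = " " :: tokB rest := by
  rw [tokB]
  split
  · next k heq => rw [find_space] at heq; cases heq
  · rfl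

-- when no two-character key matches, the token is the single next character
lemma tokB_one (c : Char) (rest : List Char)
    (hno : ∀ c2 rest', rest = c2 :: rest' → G2P.contains (String.ofList [c, c2]) = false) :
    tokB (c :: rest) = String.ofList [c] :: tokB rest := by
  rw [tokB]
  split
  · next k heq =>
    have hk := List.mem_of_find?_eq_some heq
    have hp : k.toList.isPrefixOf (c :: rest) = true := by
      simpa using List.find?_some heq
    rw [List.isPrefixOf_iff_prefix] at hp
    rcases keys_len k hk with h1 | h2
    · obtain ⟨d, hd⟩ := List.length_eq_one_iff.mp h1
      rw [hd, List.cons_prefix_cons] at hp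
      obtain ⟨rfl, -⟩ := hp
      have hk1 : k = String.ofList [d] := by
        rw [← @String.ofList_toList k, hd]
      rw [hk1]
      simp
    · exfalso
      obtain ⟨d1, d2, hd⟩ := List.length_eq_two.mp h2
      rw [hd, List.cons_prefix_cons] at hp
      obtain ⟨rfl, hp2⟩ := hp
      obtain ⟨t, ht⟩ := hp2
      have hcon : G2P.contains (String.ofList [d1, d2]) = true := by
        have hk2 : k = String.ofList [d1, d2] := by
          rw [← @String.ofList_toList k, hd]
        rw [← hk2]
        exact keys_contains k hk
      rw [hno d2 t (by simpa using ht.symm)] at hcon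
      cases hcon
  · rfl

-- when the next two characters form a key, the token is that key
lemma tokB_two (c1 c2 : Char) (rest : List Char) (h : G2P.contains (String.ofList [c1,c2]) = true) :
    tokB (c1 :: c2 :: rest) = String.ofList [c1,c2] :: tokB rest := by
  rw [tokB]
  split
  · next k heq =>
    rw [find_two _ _ _ h] at heq
    obtain rfl : String.ofList [c1,c2] = k := by injection heq
    simp
  · next heq => rw [find_two _ _ _ h] at heq; cases heq

-- a non-space single-character string is not " "
lemma ofList_one_ne_space (c : Char) (hc : c ≠ ' ') : String.ofList [c] ≠ " " := by
  intro h
  exact hc (by simpa using congrArg String.toList h)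

-- the default of getD is irrelevant for a present key
lemma getD_irrel (s d1 d2 : String) (h : G2P.contains s = true) : G2P.getD s d1 = G2P.getD s d2 := by
  rw [PySem.Dict.contains_eq_isSome_get?] at h
  obtain ⟨v, hv⟩ := Option.isSome_iff_exists.mp h
  rw [PySem.Dict.getD_eq_get?_getD, PySem.Dict.getD_eq_get?_getD, hv]
  rfl

-- A's 2-char step produces exactly tokPh of the 2-char token
lemma head_two (c1 c2 : Char) (h : G2P.contains (String.ofList [c1,c2]) = true) :
    G2P.getD (String.ofList [c1,c2]) "" = tokPh (String.ofList [c1,c2]) := by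
  unfold tokPh
  have hne : String.ofList [c1,c2] ≠ " " := by
    intro he
    have := congrArg String.toList he
    simp at this
  rw [if_neg hne]
  exact getD_irrel _ _ _ h

lemma slice_two (cs : List Char) (i : Nat) :
    PySem.List.slice cs (some (i:Int)) (some ((i:Int)+2)) = (cs.drop i).take 2 := by
  rw [PySem.List.slice_toNat cs (Int.natCast_nonneg i) (by positivity),
      show ((i:Int)+2).toNat - ((i:Int)).toNat = 2 from by omega,
      show ((i:Int)).toNat = i from by omega]

-- main invariant: A's loop from index i equals B's token-then-map pipeline on the suffix
lemma main_inv (n : Nat) : ∀ (cs : List Char) (i : Nat), cs.length - i ≤ n →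
    loopA cs i = (tokB (cs.drop i)).map tokPh := by
  induction n with
  | zero =>
    intro cs i h
    have hle : cs.length ≤ i := by omega
    rw [loopA, dif_neg (by omega), List.drop_eq_nil_of_le hle, tokB]
    simp
  | succ n ih =>
    intro cs i h
    by_cases hi : i < cs.length
    · have hdrop : cs.drop i = cs[i] :: cs.drop (i+1) := List.drop_eq_getElem_cons hi
      rw [loopA, dif_pos hi]
      by_cases hsp : cs[i] = ' '
      · rw [if_pos hsp, hdrop, hsp, tokB_space]
        rw [List.map_cons, ih cs (i+1) (by omega)]
        rfl
      · rw [if_neg hsp]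
        by_cases h2 : i + 1 < cs.length
            ∧ G2P.contains (String.ofList (PySem.List.slice cs (some (i:Int)) (some ((i:Int)+2)))) = true
        · obtain ⟨hlen, hcon⟩ := h2
          have hdrop1 : cs.drop (i+1) = cs[i+1] :: cs.drop (i+2) := List.drop_eq_getElem_cons hlen
          have hsl : PySem.List.slice cs (some (i:Int)) (some ((i:Int)+2)) = [cs[i], cs[i+1]] := by
            rw [slice_two, hdrop, hdrop1]; rfl
          rw [hsl] at hcon
          rw [if_pos ⟨hlen, by rw [hsl]; exact hcon⟩, hsl]
          rw [hdrop, hdrop1, tokB_two _ _ _ hcon]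
          rw [List.map_cons, head_two _ _ hcon, ih cs (i+2) (by omega)]
        · rw [if_neg h2]
          have hno : ∀ c2 rest', cs.drop (i+1) = c2 :: rest' →
              G2P.contains (String.ofList [cs[i], c2]) = false := by
            intro c2 rest' hr
            by_cases hlen : i + 1 < cs.length
            · have hdrop1 : cs.drop (i+1) = cs[i+1] :: cs.drop (i+2) := List.drop_eq_getElem_cons hlen
              rw [hdrop1] at hr
              have hc2 : cs[i+1] = c2 := (List.cons_eq_cons.mp hr).1
              subst hc2
              have hsl : PySem.List.slice cs (some (i:Int)) (some ((i:Int)+2)) = [cs[i], cs[i+1]] := by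
                rw [slice_two, hdrop, hdrop1]; rfl
              by_contra hcc
              simp only [Bool.not_eq_false] at hcc
              exact h2 ⟨hlen, by rw [hsl]; exact hcc⟩
            · exfalso
              have hnil : cs.drop (i+1) = [] := List.drop_eq_nil_of_le (by omega)
              rw [hnil] at hr; cases hr
          rw [hdrop, tokB_one _ _ hno, List.map_cons, ih cs (i+1) (by omega)]
          by_cases hco : G2P.contains (String.ofList [cs[i]]) = true
          · rw [if_pos hco]
            have : G2P.getD (String.ofList [cs[i]]) "" = tokPh (String.ofList [cs[i]]) := by
              unfold tokPh
              rw [if_neg (ofList_one_ne_space _ hsp)]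
              exact getD_irrel _ _ _ hco
            rw [this]
          · rw [if_neg hco]
            have hph : tokPh (String.ofList [cs[i]]) = String.ofList [cs[i]] := by
              unfold tokPh
              rw [if_neg (ofList_one_ne_space _ hsp),
                  PySem.Dict.getD_of_not_contains G2P (String.ofList [cs[i]]) (by simpa using hco)]
            exact List.cons_eq_cons.mpr ⟨hph.symm, rfl⟩
    · rw [loopA, dif_neg hi, List.drop_eq_nil_of_le (by omega), tokB]
      simp

-- ===== VERDICT (by name: the statement is the Claim_ definition above) =====
theorem santhali_latin_to_phonemes_spec : Claim_equal_santhali_latin_to_phonemes := by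
  intro text _
  unfold Spec_santhali_latin_to_phonemes santhali_latin_to_phonemes santhali_latin_to_phonemes_alt
  rw [main_inv ((PySem.Str.strip (PySem.Str.lower text)).toList.length) _ 0 (by omega)]
  rfl
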